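-- pv_equiv track=rewrite | github.com/sfelice-amp/pdf-to-markdown | app.py | collapse_empty_columns
-- ===== SOURCE A (Python) =====
-- def collapse_empty_columns(rows: list[list[str]]) -> list[list[str]]:
--     """Merge adjacent columns that never both have content in the same row.
--
--     pdfplumber often creates offset column grids where headers use one set of
--     columns and data rows use adjacent columns. This detects that pattern and
--     merges them into single columns.
--     """
--     if not rows:
--         return rows
--
--     num_cols = max(len(row) for row in rows)
--     # Pad all rows to same length
--     padded = [row + [""] * (num_cols - len(row)) for row in rows]
--
--     # Iteratively merge adjacent column pairs that never conflict
--     changed = True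
--     while changed:
--         changed = False
--         num_cols = len(padded[0]) if padded else 0
--         for col_idx in range(num_cols - 1):
--             # Check if columns col_idx and col_idx+1 ever both have content
--             conflict = False
--             for row in padded:
--                 a = row[col_idx].strip()
--                 b = row[col_idx + 1].strip()
--                 if a and b:
--                     conflict = True
--                     break
--             if not conflict:
--                 # Merge: take whichever has content (or empty if both empty)
--                 for row in padded:
--                     a = row[col_idx].strip()
--                     b = row[col_idx + 1].strip()
--                     row[col_idx] = a if a else b
--                 # Remove the now-redundant column
--                 for row in padded:
--                     del row[col_idx + 1]
--                 changed = True
--                 break  # Restart scan since indices shifted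
--
--     # Remove any columns that are still entirely empty
--     if padded:
--         num_cols = len(padded[0])
--         keep = [
--             c for c in range(num_cols)
--             if any(row[c].strip() for row in padded)
--         ]
--         padded = [[row[c] for c in keep] for row in padded]
--
--     return padded
-- ===== SOURCE B (Python) =====
-- def collapse_empty_columns(rows: list[list[str]]) -> list[list[str]]:
--     """Single left-to-right greedy pass over columns: merge each column into the
--     current rightmost group when they never conflict in any row, then drop
--     all-empty groups and rebuild the rows."""
--     if not rows:
--         return rows
--     num_cols = max(len(r) for r in rows)
--     padded = [r + [""] * (num_cols - len(r)) for r in rows]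
--     cols = [[row[c] for row in padded] for c in range(num_cols)]
--     groups = []
--     for col in cols:
--         if groups and not any(a.strip() and b.strip() for a, b in zip(groups[-1], col)):
--             last = groups[-1]
--             groups[-1] = [a.strip() if a.strip() else b.strip() for a, b in zip(last, col)]
--         else:
--             groups.append(col)
--     kept = [g for g in groups if any(v.strip() for v in g)]
--     return [[g[r] for g in kept] for r in range(len(padded))]
-- ===== Notes on version B (the rewrite author's own statement) =====
-- stated objective: alternative
-- what changed: A rescans adjacent column pairs row by row from the left after every single merge (restart-on-change while loop over the row-major grid); B transposes once and makes a single left-to-right greedy pass that merges each column into the current rightmost group, then one filter pass drops the all-empty groups.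
import Mathlib
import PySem

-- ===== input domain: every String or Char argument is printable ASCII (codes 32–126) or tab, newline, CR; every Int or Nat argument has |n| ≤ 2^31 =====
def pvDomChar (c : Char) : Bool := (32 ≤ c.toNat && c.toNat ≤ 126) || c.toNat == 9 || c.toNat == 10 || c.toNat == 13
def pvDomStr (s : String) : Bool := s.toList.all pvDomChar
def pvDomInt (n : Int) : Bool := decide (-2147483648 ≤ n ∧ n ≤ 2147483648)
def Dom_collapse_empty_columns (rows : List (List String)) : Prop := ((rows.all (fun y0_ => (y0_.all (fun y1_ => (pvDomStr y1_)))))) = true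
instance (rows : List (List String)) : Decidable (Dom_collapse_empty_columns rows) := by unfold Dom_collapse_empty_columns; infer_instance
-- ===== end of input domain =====

-- B replaces A's restart-on-every-merge rescan of adjacent column pairs by one
-- left-to-right greedy pass over the transposed columns (objective: alternative,
-- single-pass grouping). Return values only; neither program mutates `rows`.

-- ===== PORT A =====
-- `for row in padded: … break` conflict scan ≡ List.any; `padded` is always
-- rectangular, so `List.getD _ ""` is exact for Python's `row[i]` here.
def pvAConflict (padded : List (List String)) (i : Nat) : Bool :=
  padded.any (fun row =>
    PySem.Str.strip (row.getD i "") != "" && PySem.Str.strip (row.getD (i + 1) "") != "")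

-- `len(padded[0]) if padded else 0`
def pvHeadLen (padded : List (List String)) : Nat :=
  match padded with
  | [] => 0
  | r :: _ => r.length

-- body of the merge pass: `row[col_idx] = a if a else b`
def pvASet (i : Nat) (row : List String) : List String :=
  row.set i (if PySem.Str.strip (row.getD i "") != "" then PySem.Str.strip (row.getD i "")
             else PySem.Str.strip (row.getD (i + 1) ""))

-- the `while changed:` loop: find the first non-conflicting adjacent pair,
-- merge it (one pass setting row[i], one pass deleting row[i+1]) and restart.
def pvALoop (padded : List (List String)) : List (List String) :=
  match h : (List.range (pvHeadLen padded - 1)).find? (fun i => !pvAConflict padded i) with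
  | none => padded
  | some i => pvALoop ((padded.map (pvASet i)).map (fun row => row.eraseIdx (i + 1)))
termination_by pvHeadLen padded
decreasing_by
  have hi := List.mem_range.mp (List.mem_of_find?_eq_some h)
  cases padded with
  | nil => simp [pvHeadLen] at hi
  | cons r t =>
    simp only [pvHeadLen, List.map_attach_eq_pmap, List.pmap, List.map_cons,
      List.length_eraseIdx, List.length_set, pvASet] at *
    split <;> omega

def collapse_empty_columns (rows : List (List String)) : List (List String) :=
  match rows with
  | [] => rows
  | _ :: _ =>
    let num_cols := (PySem.List.max? (rows.map (fun row => row.length)) (fun x => x)).getD 0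
    let padded := rows.map (fun row => row ++ List.replicate (num_cols - row.length) "")
    let padded2 := pvALoop padded
    match padded2 with
    | [] => padded2
    | r0 :: _ =>
      let keep := (List.range r0.length).filter (fun c =>
        padded2.any (fun row => PySem.Str.strip (row.getD c "") != ""))
      padded2.map (fun row => keep.map (fun c => row.getD c ""))

-- ===== PORT B =====
def pvBConflict (g col : List String) : Bool :=
  (g.zip col).any (fun p => PySem.Str.strip p.1 != "" && PySem.Str.strip p.2 != "")

def pvBMerge (g col : List String) : List String :=
  (g.zip col).map (fun p =>
    if PySem.Str.strip p.1 != "" then PySem.Str.strip p.1 else PySem.Str.strip p.2)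

-- one step of the greedy pass: merge `col` into the last group or start a new group
def pvBStep (groups : List (List String)) (col : List String) : List (List String) :=
  match groups.getLast? with
  | some last =>
      if !pvBConflict last col then groups.dropLast ++ [pvBMerge last col]
      else groups ++ [col]
  | none => groups ++ [col]

def collapse_empty_columns_alt (rows : List (List String)) : List (List String) :=
  match rows with
  | [] => rows
  | _ :: _ =>
    let num_cols := (PySem.List.max? (rows.map (fun row => row.length)) (fun x => x)).getD 0
    let padded := rows.map (fun row => row ++ List.replicate (num_cols - row.length) "")
    let cols := (List.range num_cols).map (fun c => padded.map (fun row => row.getD c ""))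
    let groups := cols.foldl pvBStep []
    let kept := groups.filter (fun g => g.any (fun v => PySem.Str.strip v != ""))
    (List.range padded.length).map (fun r => kept.map (fun g => g.getD r ""))

-- ===== PRECONDITION & SPEC =====
def Spec_collapse_empty_columns (rows : List (List String)) (out : List (List String)) : Prop := out = collapse_empty_columns_alt rows
instance (rows : List (List String)) (out : List (List String)) : Decidable (Spec_collapse_empty_columns rows out) := by unfold Spec_collapse_empty_columns; infer_instance

-- ===== CLAIM (what is proved, stated in full; the proofs are below) =====
def Claim_equal_collapse_empty_columns : Prop := ∀ (rows : List (List String)), Dom_collapse_empty_columns rows → Spec_collapse_empty_columns rows (collapse_empty_columns rows)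

-- ===== LEMMAS AND PROOFS =====

-- ---- strip is idempotent ----
theorem pv_dropWhile_head {α : Type} (p : α → Bool) (l : List α) (a : α)
    (h : (l.dropWhile p).head? = some a) : p a = false := by
  induction l with
  | nil => simp at h
  | cons x t ih =>
    rw [List.dropWhile_cons] at h
    by_cases hx : p x = true
    · simp [hx] at h; exact ih h
    · simp [hx] at h ⊢; subst h; simpa using hx

theorem pv_dropWhile_of_head {α : Type} (p : α → Bool) (l : List α)
    (h : ∀ a, l.head? = some a → p a = false) : l.dropWhile p = l := by
  cases l with
  | nil => simp
  | cons x t => simp [h x rfl]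

theorem pv_rstrip_prefix (l : List Char) : PySem.Chars.rstrip l <+: l := by
  have h := List.dropWhile_suffix (l := l.reverse) PySem.Chars.isspace
  have := List.reverse_suffix (l₁ := (List.dropWhile PySem.Chars.isspace l.reverse).reverse)
    (l₂ := l)
  unfold PySem.Chars.rstrip
  exact this.mp (by simpa using h)

theorem pv_prefix_head {α : Type} {l' l : List α} {a : α}
    (h : l' <+: l) (ha : l'.head? = some a) : l.head? = some a := by
  obtain ⟨t, rfl⟩ := h
  cases l' with
  | nil => simp at ha
  | cons x t' => simpa using ha

theorem pv_rstrip_rstrip (x : List Char) :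
    PySem.Chars.rstrip (PySem.Chars.rstrip x) = PySem.Chars.rstrip x := by
  unfold PySem.Chars.rstrip
  rw [List.reverse_reverse]
  rw [pv_dropWhile_of_head _ _ (fun a ha => pv_dropWhile_head _ _ a ha)]

theorem pv_strip_strip_chars (l : List Char) :
    PySem.Chars.strip (PySem.Chars.strip l) = PySem.Chars.strip l := by
  unfold PySem.Chars.strip
  have h1 : PySem.Chars.lstrip (PySem.Chars.rstrip (PySem.Chars.lstrip l))
      = PySem.Chars.rstrip (PySem.Chars.lstrip l) := by
    unfold PySem.Chars.lstrip
    exact pv_dropWhile_of_head _ _ (fun a ha =>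
      pv_dropWhile_head _ _ a (pv_prefix_head (pv_rstrip_prefix _) ha))
  rw [h1, pv_rstrip_rstrip]

theorem pv_strip_strip (s : String) :
    PySem.Str.strip (PySem.Str.strip s) = PySem.Str.strip s := by
  unfold PySem.Str.strip
  rw [String.toList_ofList, pv_strip_strip_chars]

-- ---- find? helpers ----
theorem pv_find?_congr {α : Type} (p q : α → Bool) (l : List α)
    (h : ∀ x ∈ l, p x = q x) : l.find? p = l.find? q := by
  induction l with
  | nil => rfl
  | cons x t ih =>
    rw [List.find?_cons, List.find?_cons, h x (by simp)]
    split <;> [rfl; exact ih (fun y hy => h y (by simp [hy]))]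

theorem pv_find?_range_succ (p : Nat → Bool) (n : Nat) :
    (List.range (n + 1)).find? p =
      if p 0 then some 0 else ((List.range n).find? (fun i => p (i + 1))).map (· + 1) := by
  rw [List.range_succ_eq_map]
  by_cases h : p 0 = true
  · simp [h]
  · simp [h, List.find?_map]
    rfl

-- ---- columns abstraction ----
def pvConflictC (cs : List (List String)) (i : Nat) : Bool :=
  pvBConflict (cs.getD i []) (cs.getD (i + 1) [])

def pvMergeAtC (cs : List (List String)) (i : Nat) : List (List String) :=
  (cs.set i (pvBMerge (cs.getD i []) (cs.getD (i + 1) []))).eraseIdx (i + 1)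

def pvLoopC (cs : List (List String)) : List (List String) :=
  match h : (List.range (cs.length - 1)).find? (fun i => !pvConflictC cs i) with
  | none => cs
  | some i => pvLoopC (pvMergeAtC cs i)
termination_by cs.length
decreasing_by
  have hi := List.mem_range.mp (List.mem_of_find?_eq_some h)
  simp only [pvMergeAtC, List.length_eraseIdx, List.length_set]
  split <;> omega

def pvGo (g : List String) (cs : List (List String)) : List (List String) :=
  match cs with
  | [] => [g]
  | c :: rest => if !pvBConflict g c then pvGo (pvBMerge g c) rest else g :: pvGo c rest

def pvGreedy (cs : List (List String)) : List (List String) :=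
  match cs with
  | [] => []
  | c :: rest => pvGo c rest

def pvRect (m : Nat) (cs : List (List String)) : Prop := ∀ g ∈ cs, g.length = m

theorem pv_merge_length (x y : List String) (h : x.length = y.length) :
    (pvBMerge x y).length = x.length := by
  simp [pvBMerge, List.length_zip, h]

theorem pv_conflict_mono (c x y : List String) (hxy : x.length = y.length)
    (h : pvBConflict c x = true) : pvBConflict c (pvBMerge x y) = true := by
  simp only [pvBConflict, List.any_eq_true] at h ⊢
  obtain ⟨p, hp, hcond⟩ := h
  rw [List.mem_iff_getElem] at hp
  obtain ⟨j, hj, rfl⟩ := hp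
  have hlen : j < (c.zip (pvBMerge x y)).length := by
    simp only [List.length_zip, pv_merge_length x y hxy] at hj ⊢
    exact hj
  refine ⟨(c.zip (pvBMerge x y))[j], List.getElem_mem _, ?_⟩
  have hjx : j < x.length := by simp [List.length_zip] at hj; omega
  have hjy : j < y.length := by omega
  rw [List.getElem_zip] at hcond ⊢
  simp only [Bool.and_eq_true, bne_iff_ne, ne_eq] at hcond ⊢
  refine ⟨hcond.1, ?_⟩
  have hm : (pvBMerge x y)[j]'(by simpa [pv_merge_length x y hxy] using hjx) =
      if PySem.Str.strip x[j] != "" then PySem.Str.strip x[j] else PySem.Str.strip y[j] := by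
    simp [pvBMerge, List.getElem_zip]
  rw [hm]
  have hx := hcond.2
  simp [bne_iff_ne, hx, pv_strip_strip, ne_eq]

theorem pv_rect_mergeAt {m : Nat} {cs : List (List String)} (i : Nat)
    (hi : i + 1 < cs.length) (h : pvRect m cs) : pvRect m (pvMergeAtC cs i) := by
  intro g hg
  have hg' := List.eraseIdx_subset hg
  rcases List.mem_or_eq_of_mem_set hg' with h1 | h1
  · exact h g h1
  · subst h1
    have e1 : cs.getD i [] = cs[i]'(by omega) := by
      simp [List.getD_eq_getElem?_getD, List.getElem?_eq_getElem (by omega : i < cs.length)]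
    have e2 : cs.getD (i+1) [] = cs[i+1]'hi := by
      simp [List.getD_eq_getElem?_getD, List.getElem?_eq_getElem hi]
    rw [e1, e2, pv_merge_length]
    · exact h _ (List.getElem_mem _)
    · rw [h _ (List.getElem_mem _), h _ (List.getElem_mem _)]

theorem pv_conflictC_cons (c : List String) (cs : List (List String)) (i : Nat) :
    pvConflictC (c :: cs) (i + 1) = pvConflictC cs i := by
  simp [pvConflictC]

theorem pv_mergeAtC_cons (c : List String) (cs : List (List String)) (i : Nat) :
    pvMergeAtC (c :: cs) (i + 1) = c :: pvMergeAtC cs i := by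
  simp [pvMergeAtC, List.set_cons_succ, List.eraseIdx_cons_succ]

theorem pvLoopC_none (cs : List (List String))
    (h : (List.range (cs.length - 1)).find? (fun i => !pvConflictC cs i) = none) :
    pvLoopC cs = cs := by
  rw [pvLoopC, h]

theorem pvLoopC_some (cs : List (List String)) (i : Nat)
    (h : (List.range (cs.length - 1)).find? (fun i => !pvConflictC cs i) = some i) :
    pvLoopC cs = pvLoopC (pvMergeAtC cs i) := by
  rw [pvLoopC, h]

theorem pv_find?_shift (c : List String) (cs' : List (List String)) (hc : pvConflictC (c :: cs') 0 = true) :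
    (List.range ((c :: cs').length - 1)).find? (fun i => !pvConflictC (c :: cs') i)
      = ((List.range (cs'.length - 1)).find? (fun i => !pvConflictC cs' i)).map (· + 1) := by
  cases cs' with
  | nil => simp
  | cons c₁ rest =>
    have h1 : (c :: c₁ :: rest).length - 1 = rest.length + 1 := by simp
    rw [h1, pv_find?_range_succ]
    simp only [hc, Bool.not_true, Bool.false_eq_true, if_false]
    have hpred : (fun i => !pvConflictC (c :: c₁ :: rest) (i + 1)) = (fun i => !pvConflictC (c₁ :: rest) i) := by
      funext i; rw [pv_conflictC_cons]
    rw [hpred]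
    simp

-- L2: a head column that conflicts with its left neighbour stays put
theorem pv_loopC_cons (m : Nat) : ∀ (n : Nat) (c : List String) (cs' : List (List String)),
    cs'.length = n → pvRect m (c :: cs') →
    (∀ c₁ ∈ cs'.head?, pvBConflict c c₁ = true) →
    pvLoopC (c :: cs') = c :: pvLoopC cs' := by
  intro n
  induction n using Nat.strong_induction_on with
  | _ n IH =>
  intro c cs' hlen hrect hconf
  cases cs' with
  | nil =>
    rw [pvLoopC_none _ (by simp), pvLoopC_none _ (by simp)]
  | cons c₁ rest =>
    have hc : pvBConflict c c₁ = true := hconf c₁ (by simp)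
    have hc0 : pvConflictC (c :: c₁ :: rest) 0 = true := by simpa [pvConflictC] using hc
    have hshift := pv_find?_shift c (c₁ :: rest) hc0
    cases hfind : (List.range ((c₁ :: rest).length - 1)).find? (fun i => !pvConflictC (c₁ :: rest) i) with
    | none =>
      rw [pvLoopC_none _ (by rw [hshift, hfind]; rfl), pvLoopC_none _ hfind]
    | some i =>
      have hi : i < (c₁ :: rest).length - 1 := List.mem_range.mp (List.mem_of_find?_eq_some hfind)
      rw [pvLoopC_some _ (i + 1) (by rw [hshift, hfind]; rfl)]
      rw [pv_mergeAtC_cons]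
      have hrect' : pvRect m (c :: pvMergeAtC (c₁ :: rest) i) := by
        intro g hg
        rcases List.mem_cons.mp hg with rfl | hg'
        · exact hrect g (by simp)
        · exact pv_rect_mergeAt i (by simp only [List.length_cons] at hi ⊢; omega)
            (fun g' hg' => hrect g' (List.mem_cons_of_mem _ hg')) g hg'
      have hlen' : (pvMergeAtC (c₁ :: rest) i).length = (c₁ :: rest).length - 1 := by
        simp only [pvMergeAtC, List.length_eraseIdx, List.length_set]
        simp at hi ⊢
        omega
      have hhead : ∀ c₂ ∈ (pvMergeAtC (c₁ :: rest) i).head?, pvBConflict c c₂ = true := by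
        intro c₂ hc₂
        cases i with
        | zero =>
          have hmz : pvMergeAtC (c₁ :: rest) 0 = pvBMerge c₁ (rest[0]?.getD []) :: rest.eraseIdx 0 := by
            simp [pvMergeAtC, List.getD_eq_getElem?_getD]
          rw [hmz] at hc₂
          simp at hc₂
          subst hc₂
          apply pv_conflict_mono _ _ _ _ hc
          · have h1 : (0:Nat) < rest.length := by simpa using hi
            have e2 : rest[0]?.getD [] = rest[0]'h1 := by
              rw [List.getElem?_eq_getElem h1]; rfl
            rw [e2, hrect c₁ (by simp), hrect (rest[0]'h1) (by simp [List.getElem_mem])]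
        | succ j =>
          rw [pv_mergeAtC_cons] at hc₂
          simp at hc₂
          subst hc₂
          exact hc
      have hlt : (c₁ :: rest).length - 1 < n := by
        simp only [List.length_cons] at hlen ⊢
        omega
      rw [IH ((c₁ :: rest).length - 1) hlt c _ hlen' hrect' hhead]
      rw [← pvLoopC_some _ i hfind]

-- L1: the restart loop is the greedy pass
theorem pv_loopC_greedy (m : Nat) : ∀ (n : Nat) (cs : List (List String)),
    cs.length = n → pvRect m cs → pvLoopC cs = pvGreedy cs := by
  intro n
  induction n using Nat.strong_induction_on with
  | _ n IH =>
  intro cs hlen hrect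
  match cs with
  | [] => rw [pvLoopC_none _ (by simp)]; rfl
  | [c] => rw [pvLoopC_none _ (by simp)]; rfl
  | c :: c' :: rest =>
    by_cases hc : pvBConflict c c' = true
    · have := pv_loopC_cons m (c' :: rest).length c (c' :: rest) rfl hrect
        (by intro x hx; simp at hx; subst hx; exact hc)
      rw [this]
      have hlt : (c' :: rest).length < n := by simp at hlen ⊢; omega
      rw [IH _ hlt (c' :: rest) rfl (fun g hg => hrect g (List.mem_cons_of_mem _ hg))]
      show c :: pvGo c' rest = pvGreedy (c :: c' :: rest)
      simp [pvGreedy, pvGo, hc]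
    · have hb : (!pvConflictC (c :: c' :: rest) 0) = true := by
        simp only [pvConflictC, List.getD_cons_zero, List.getD_cons_succ, Bool.not_eq_true']
        simpa using hc
      have hfind : (List.range ((c :: c' :: rest).length - 1)).find? (fun i => !pvConflictC (c :: c' :: rest) i)
          = some 0 := by
        have h1 : (c :: c' :: rest).length - 1 = rest.length + 1 := by simp
        rw [h1, pv_find?_range_succ]
        simp only [hb]
        rfl
      rw [pvLoopC_some _ 0 hfind]
      have hmz : pvMergeAtC (c :: c' :: rest) 0 = pvBMerge c c' :: rest := by
        simp [pvMergeAtC]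
      rw [hmz]
      have hrect' : pvRect m (pvBMerge c c' :: rest) := by
        intro g hg
        rcases List.mem_cons.mp hg with rfl | hg'
        · rw [pv_merge_length c c' (by rw [hrect c (by simp), hrect c' (by simp)])]
          exact hrect c (by simp)
        · exact hrect g (by simp [hg'])
      have hlt : (pvBMerge c c' :: rest).length < n := by simp at hlen ⊢; omega
      rw [IH _ hlt _ rfl hrect']
      show pvGreedy (pvBMerge c c' :: rest) = pvGreedy (c :: c' :: rest)
      simp [pvGreedy, pvGo, hc]

-- foldl with snoc = pvGo
theorem pv_foldl_go : ∀ (cs : List (List String)) (acc : List (List String)) (g : List String),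
    cs.foldl pvBStep (acc ++ [g]) = acc ++ pvGo g cs := by
  intro cs
  induction cs with
  | nil => intro acc g; simp [pvGo]
  | cons c rest ih =>
    intro acc g
    rw [List.foldl_cons]
    have hstep : pvBStep (acc ++ [g]) c =
        if !pvBConflict g c then acc ++ [pvBMerge g c] else (acc ++ [g]) ++ [c] := by
      simp [pvBStep]
    rw [hstep]
    by_cases hc : pvBConflict g c = true
    · simp only [hc, Bool.not_true, Bool.false_eq_true, if_false]
      rw [ih (acc ++ [g]) c]
      simp [pvGo, hc]
    · simp only [Bool.not_eq_true] at hc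
      simp only [hc, Bool.not_false, if_true]
      rw [ih acc (pvBMerge g c)]
      simp [pvGo, hc]

theorem pv_foldl_greedy (cs : List (List String)) :
    cs.foldl pvBStep [] = pvGreedy cs := by
  cases cs with
  | nil => rfl
  | cons c rest =>
    rw [List.foldl_cons]
    have h1 : pvBStep [] c = [] ++ [c] := by simp [pvBStep]
    rw [h1, pv_foldl_go rest [] c]
    rfl


-- ---- rows ↔ columns bridge ----
def pvColsOf (padded : List (List String)) (n : Nat) : List (List String) :=
  (List.range n).map (fun c => padded.map (fun row => row.getD c ""))

theorem pv_colsOf_length (padded : List (List String)) (n : Nat) :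
    (pvColsOf padded n).length = n := by simp [pvColsOf]

theorem pv_colsOf_getD (padded : List (List String)) (n c : Nat) (hc : c < n) :
    (pvColsOf padded n).getD c [] = padded.map (fun row => row.getD c "") := by
  simp [pvColsOf, List.getD_eq_getElem?_getD, hc]

theorem pv_rect_colsOf (padded : List (List String)) (n : Nat) :
    pvRect padded.length (pvColsOf padded n) := by
  intro g hg
  simp [pvColsOf] at hg
  obtain ⟨c, _, rfl⟩ := hg
  simp

theorem pv_aConflict_eq (padded : List (List String)) (n i : Nat) (hi : i + 1 < n) :
    pvConflictC (pvColsOf padded n) i = pvAConflict padded i := by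
  unfold pvConflictC pvBConflict pvAConflict
  rw [pv_colsOf_getD _ _ i (by omega), pv_colsOf_getD _ _ (i + 1) hi, List.zip_map',
    List.any_map]
  rfl

theorem pv_colsOf_getElem? (padded : List (List String)) (n c : Nat) (hc : c < n) :
    (pvColsOf padded n)[c]? = some (padded.map (fun row => row.getD c "")) := by
  unfold pvColsOf
  rw [List.getElem?_map, List.getElem?_range hc]
  rfl

theorem pv_colsOf_merge (padded : List (List String)) (n i : Nat) (hi : i + 1 < n)
    (hI : ∀ row ∈ padded, row.length = n) :
    pvColsOf ((padded.map (pvASet i)).map (fun row => row.eraseIdx (i + 1))) (n - 1)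
      = pvMergeAtC (pvColsOf padded n) i := by
  have hv : pvBMerge ((pvColsOf padded n).getD i []) ((pvColsOf padded n).getD (i + 1) [])
      = padded.map (fun row =>
          if PySem.Str.strip (row.getD i "") != "" then PySem.Str.strip (row.getD i "")
          else PySem.Str.strip (row.getD (i + 1) "")) := by
    rw [pv_colsOf_getD _ _ i (by omega), pv_colsOf_getD _ _ (i + 1) hi]
    unfold pvBMerge
    rw [List.zip_map', List.map_map]
    rfl
  have hCSlen : ((pvColsOf padded n).set i (pvBMerge ((pvColsOf padded n).getD i [])
      ((pvColsOf padded n).getD (i + 1) []))).length = n := by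
    rw [List.length_set, pv_colsOf_length]
  apply List.ext_getElem?
  intro c
  rw [List.map_map]
  have hL : ∀ (g : List String → List String),
      (pvColsOf (padded.map g) (n - 1))[c]?
      = if c < n - 1 then some (padded.map (fun row => (g row).getD c "")) else none := by
    intro g
    split
    · rename_i h
      rw [pv_colsOf_getElem? _ _ _ h, List.map_map]
      rfl
    · rename_i h
      exact List.getElem?_eq_none (by rw [pv_colsOf_length]; omega)
  rw [hL]
  unfold pvMergeAtC
  rw [List.getElem?_eraseIdx]
  by_cases hc : c < n - 1
  · rw [if_pos hc]
    by_cases hc1 : c < i + 1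
    · rw [if_pos hc1, List.getElem?_set]
      by_cases hci : i = c
      · subst hci
        rw [if_pos rfl, if_pos (by rw [pv_colsOf_length]; omega), hv]
        congr 1
        apply List.map_congr_left
        intro row hrow
        have hrl := hI row hrow
        simp only [Function.comp_apply]
        rw [List.getD_eq_getElem?_getD, List.getElem?_eraseIdx, if_pos (by omega)]
        unfold pvASet
        rw [List.getElem?_set, if_pos rfl, if_pos (by omega)]
        rfl
      · rw [if_neg hci, pv_colsOf_getElem? _ _ _ (by omega)]
        congr 1
        apply List.map_congr_left
        intro row hrow
        simp only [Function.comp_apply]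
        rw [List.getD_eq_getElem?_getD, List.getElem?_eraseIdx, if_pos hc1]
        unfold pvASet
        rw [List.getElem?_set, if_neg hci, List.getD_eq_getElem?_getD]
    · rw [if_neg hc1, List.getElem?_set, if_neg (by omega),
        pv_colsOf_getElem? _ _ _ (by omega)]
      congr 1
      apply List.map_congr_left
      intro row hrow
      simp only [Function.comp_apply]
      rw [List.getD_eq_getElem?_getD, List.getElem?_eraseIdx, if_neg hc1]
      unfold pvASet
      rw [List.getElem?_set, if_neg (by omega), List.getD_eq_getElem?_getD]
  · rw [if_neg hc]
    symm
    split
    · exact List.getElem?_eq_none (by rw [hCSlen]; omega)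
    · exact List.getElem?_eq_none (by rw [hCSlen]; omega)

theorem pvALoop_none (padded : List (List String))
    (h : (List.range (pvHeadLen padded - 1)).find? (fun i => !pvAConflict padded i) = none) :
    pvALoop padded = padded := by
  rw [pvALoop, h]

theorem pvALoop_some (padded : List (List String)) (i : Nat)
    (h : (List.range (pvHeadLen padded - 1)).find? (fun i => !pvAConflict padded i) = some i) :
    pvALoop padded = pvALoop ((padded.map (pvASet i)).map (fun row => row.eraseIdx (i + 1))) := by
  rw [pvALoop, h]

theorem pv_aLoop_bridge : ∀ (n : Nat) (padded : List (List String)), padded ≠ [] →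
    (∀ row ∈ padded, row.length = n) →
    pvALoop padded ≠ [] ∧ (pvALoop padded).length = padded.length ∧
    ∃ n', (∀ row ∈ pvALoop padded, row.length = n') ∧
      pvColsOf (pvALoop padded) n' = pvLoopC (pvColsOf padded n) := by
  intro n
  induction n using Nat.strong_induction_on with
  | _ n IH =>
  intro padded hne hI
  have hhl : pvHeadLen padded = n := by
    cases padded with
    | nil => exact absurd rfl hne
    | cons r t => exact hI r (by simp)
  have hfind_eq : (List.range (pvHeadLen padded - 1)).find? (fun i => !pvAConflict padded i)
      = (List.range ((pvColsOf padded n).length - 1)).find?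
          (fun i => !pvConflictC (pvColsOf padded n) i) := by
    rw [hhl, pv_colsOf_length]
    exact (pv_find?_congr _ _ _ (fun i hi => by
      rw [List.mem_range] at hi
      rw [pv_aConflict_eq padded n i (by omega)])).symm
  cases hfind : (List.range ((pvColsOf padded n).length - 1)).find?
      (fun i => !pvConflictC (pvColsOf padded n) i) with
  | none =>
    rw [pvALoop_none _ (hfind_eq.trans hfind), pvLoopC_none _ hfind]
    exact ⟨hne, rfl, n, hI, rfl⟩
  | some i =>
    have hi : i < n - 1 := by
      have := List.mem_range.mp (List.mem_of_find?_eq_some hfind)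
      simpa [pv_colsOf_length] using this
    rw [pvALoop_some _ i (hfind_eq.trans hfind), pvLoopC_some _ i hfind]
    have hne₂ : (padded.map (pvASet i)).map (fun row => row.eraseIdx (i + 1)) ≠ [] := by
      cases padded with
      | nil => exact absurd rfl hne
      | cons r t => simp
    have hI₂ : ∀ row ∈ (padded.map (pvASet i)).map (fun row => row.eraseIdx (i + 1)),
        row.length = n - 1 := by
      intro row hrow
      rw [List.map_map] at hrow
      simp only [List.mem_map] at hrow
      obtain ⟨r, hr, rfl⟩ := hrow
      have hrl := hI r hr
      simp only [Function.comp, pvASet, List.length_eraseIdx, List.length_set, hrl]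
      split <;> omega
    obtain ⟨h1, h2, n', h3, h4⟩ := IH (n - 1) (by omega) _ hne₂ hI₂
    refine ⟨h1, ?_, n', h3, ?_⟩
    · rw [h2]; simp
    · rw [h4, pv_colsOf_merge padded n i (by omega) hI]

-- filtering a list of columns by index = filtering the list itself
theorem pv_filter_range {α β : Type} (cs : List α) (d : α) (p : α → Bool) (f : α → β) :
    ((List.range cs.length).filter (fun c => p (cs.getD c d))).map (fun c => f (cs.getD c d))
      = (cs.filter p).map f := by
  induction cs with
  | nil => simp
  | cons a t ih =>
    rw [List.length_cons, List.range_succ_eq_map, List.filter_cons]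
    have hmap : (List.filter (fun c => p ((a :: t).getD c d)) (List.map Nat.succ (List.range t.length)))
        = List.map Nat.succ (List.filter (fun c => p (t.getD c d)) (List.range t.length)) := by
      rw [List.filter_map]
      congr 1
    simp only [List.getD_cons_zero]
    by_cases hp : p a = true
    · simp only [hp, if_true]
      rw [List.map_cons, hmap, List.map_map]
      have : ((fun c => f ((a :: t).getD c d)) ∘ Nat.succ) = fun c => f (t.getD c d) := by
        funext c; simp [Function.comp]
      rw [this, ih, List.filter_cons_of_pos hp, List.map_cons, List.getD_cons_zero]
    · simp only [hp, Bool.false_eq_true, if_false]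
      rw [hmap, List.map_map]
      have : ((fun c => f ((a :: t).getD c d)) ∘ Nat.succ) = fun c => f (t.getD c d) := by
        funext c; simp [Function.comp]
      rw [this, ih, List.filter_cons_of_neg (by simp [hp])]

-- ===== assembly =====
theorem pv_main (rows : List (List String)) :
    collapse_empty_columns rows = collapse_empty_columns_alt rows := by
  cases rows with
  | nil => rfl
  | cons r0 rs =>
  simp only [collapse_empty_columns, collapse_empty_columns_alt]
  set nc := (PySem.List.max? ((r0 :: rs).map (fun row => row.length)) (fun x => x)).getD 0
    with hnc
  set padded := (r0 :: rs).map (fun row => row ++ List.replicate (nc - row.length) "")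
    with hpad
  have hne : padded ≠ [] := by simp [hpad]
  have hlen_le : ∀ row ∈ (r0 :: rs), row.length ≤ nc := by
    intro row hrow
    rcases hmax : PySem.List.max? ((r0 :: rs).map (fun row => row.length)) (fun x => x)
      with _ | m
    · exact absurd ((PySem.List.max?_eq_none_iff _ _).mp hmax) (by simp)
    · have hle := PySem.List.max?_isMax hmax row.length (List.mem_map_of_mem hrow)
      have hm : nc = m := by rw [hnc, hmax]; rfl
      rw [hm]
      simpa using hle
  have hI : ∀ row ∈ padded, row.length = nc := by
    intro row hrow
    rw [hpad] at hrow
    simp only [List.mem_map] at hrow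
    obtain ⟨r, hr, rfl⟩ := hrow
    have hle := hlen_le r hr
    simp only [List.length_append, List.length_replicate]
    omega
  obtain ⟨h1, h2, n', h3, h4⟩ := pv_aLoop_bridge nc padded hne hI
  have hcols : (List.range nc).map (fun c => padded.map (fun row => row.getD c ""))
      = pvColsOf padded nc := rfl
  rw [hcols]
  have hgr : (pvColsOf padded nc).foldl pvBStep [] = pvLoopC (pvColsOf padded nc) := by
    rw [pv_foldl_greedy, ← pv_loopC_greedy padded.length (pvColsOf padded nc).length _ rfl
      (pv_rect_colsOf padded nc)]
  rw [hgr]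
  have hlen' : (pvLoopC (pvColsOf padded nc)).length = n' := by
    rw [← h4, pv_colsOf_length]
  cases hA : pvALoop padded with
  | nil => exact absurd hA h1
  | cons q qs =>
  rw [hA] at h2 h3 h4
  have hq : q.length = n' := h3 q (by simp)
  have hcol : ∀ c, c < n' → (pvLoopC (pvColsOf padded nc)).getD c []
      = (q :: qs).map (fun row => row.getD c "") := by
    intro c hc
    rw [← h4, pv_colsOf_getD _ _ c hc]
  apply List.ext_getElem?
  intro r
  rw [List.getElem?_map, List.getElem?_map]
  by_cases hr : r < padded.length
  case neg =>
    rw [List.getElem?_eq_none (l := List.range padded.length) (by simpa using hr),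
      List.getElem?_eq_none (l := q :: qs) (by omega)]
    rfl
  case pos =>
  have hrlt : r < (q :: qs).length := by omega
  rw [List.getElem?_range hr, List.getElem?_eq_getElem hrlt]
  simp only [Option.map_some, Option.some.injEq]
  have hfilter : (List.range q.length).filter
        (fun c => (q :: qs).any (fun row => PySem.Str.strip (row.getD c "") != ""))
      = (List.range (pvLoopC (pvColsOf padded nc)).length).filter
        (fun c => ((pvLoopC (pvColsOf padded nc)).getD c []).any
          (fun v => PySem.Str.strip v != "")) := by
    rw [hq, ← hlen']
    apply List.filter_congr
    intro c hc
    rw [List.mem_range, hlen'] at hc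
    rw [hcol c hc, List.any_map]
    rfl
  rw [hfilter]
  have hmapf : ((List.range (pvLoopC (pvColsOf padded nc)).length).filter
        (fun c => ((pvLoopC (pvColsOf padded nc)).getD c []).any
          (fun v => PySem.Str.strip v != ""))).map (fun c => (q :: qs)[r].getD c "")
      = ((List.range (pvLoopC (pvColsOf padded nc)).length).filter
        (fun c => ((pvLoopC (pvColsOf padded nc)).getD c []).any
          (fun v => PySem.Str.strip v != ""))).map
        (fun c => ((pvLoopC (pvColsOf padded nc)).getD c []).getD r "") := by
    apply List.map_congr_left
    intro c hc
    have hc' : c < n' := by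
      have := List.mem_range.mp (List.mem_of_mem_filter hc)
      omega
    rw [hcol c hc']
    conv_rhs => rw [List.getD_eq_getElem?_getD, List.getElem?_map,
      List.getElem?_eq_getElem hrlt]
    rfl
  rw [hmapf]
  exact pv_filter_range (pvLoopC (pvColsOf padded nc)) []
    (fun g => g.any (fun v => PySem.Str.strip v != "")) (fun g => g.getD r "")

-- ===== VERDICT (by name: the statement is the Claim_ definition above) =====
theorem collapse_empty_columns_spec : Claim_equal_collapse_empty_columns := by
  unfold Claim_equal_collapse_empty_columns
  intro rows _hdom
  unfold Spec_collapse_empty_columns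
  exact pv_main rows
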